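-- pv_equiv track=rewrite | github.com/margarita0303/BioinformaticsAlgorithms | homework_2022.04.01/4.4.4.py | Subpeptides
-- ===== SOURCE A (Python) =====
-- def Subpeptides(string):
--     subpeptides = []
--     for lenOfSubPeptide in range(1, len(string)):
--         currentString = string + string[0:(lenOfSubPeptide - 1)]
--         for i in range(len(currentString) - lenOfSubPeptide + 1):
--             subpeptides.append(currentString[i:i+lenOfSubPeptide])
--     subpeptides.append("")
--     subpeptides.append(string)
--     return subpeptides
-- ===== SOURCE B (Python) =====
-- def Subpeptides(string):
--     n = len(string)
--     rotations = [string[k:] + string[:k] for k in range(n)]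
--     result = [rot[:L] for L in range(1, n) for rot in rotations]
--     result.append("")
--     result.append(string)
--     return result
-- ===== Notes on version B (the rewrite author's own statement) =====
-- stated objective: alternative
-- what changed: B precomputes the table of all n cyclic rotations once and emits, for every length L, the length-L prefix of each rotation, instead of rebuilding a wrapped string and sliding a window over it for every length.
import Mathlib
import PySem

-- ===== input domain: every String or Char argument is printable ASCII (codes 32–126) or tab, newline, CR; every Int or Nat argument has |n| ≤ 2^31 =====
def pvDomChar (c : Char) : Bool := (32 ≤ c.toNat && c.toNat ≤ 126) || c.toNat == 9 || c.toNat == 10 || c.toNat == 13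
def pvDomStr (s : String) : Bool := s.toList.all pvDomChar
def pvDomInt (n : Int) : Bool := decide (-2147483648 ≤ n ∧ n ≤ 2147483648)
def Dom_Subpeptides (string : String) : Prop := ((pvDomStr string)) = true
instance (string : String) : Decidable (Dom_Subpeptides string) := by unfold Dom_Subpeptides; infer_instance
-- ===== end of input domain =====

-- B builds the table of all n cyclic rotations once and takes prefixes of it, instead of
-- rebuilding a wrapped string and scanning windows for every length (objective: alternative).

-- ===== PORT A =====
-- literal transliteration of A: per length, build string + string[:L-1] and slide a window over it
def Subpeptides (string : String) : List String :=
  let cs := string.toList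
  let subpeptides : List String :=
    (PySem.List.pyRange 1 (PySem.Str.len string) 1).foldl (fun acc L =>
      let currentString := cs ++ PySem.List.slice cs (some 0) (some (L - 1))
      (PySem.List.pyRange 0 ((currentString.length : Int) - L + 1) 1).foldl (fun acc2 i =>
        acc2 ++ [String.ofList (PySem.List.slice currentString (some i) (some (i + L)))]) acc) []
  subpeptides ++ [""] ++ [string]

-- ===== PORT B =====
-- transliteration of Source B: materialize the rotation table, then take prefixes
def Subpeptides_alt (string : String) : List String :=
  let cs := string.toList
  let n := cs.length
  let rotations := (List.range n).map (fun k => cs.drop k ++ cs.take k)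
  let result := (List.range' 1 (n - 1)).flatMap
    (fun L => rotations.map (fun rot => String.ofList (rot.take L)))
  result ++ [""] ++ [string]

-- ===== PRECONDITION & SPEC =====
def Spec_Subpeptides (string : String) (out : List String) : Prop := out = Subpeptides_alt string
instance (string : String) (out : List String) : Decidable (Spec_Subpeptides string out) := by unfold Spec_Subpeptides; infer_instance

-- ===== CLAIM (what is proved, stated in full; the proofs are below) =====
def Claim_equal_Subpeptides : Prop := ∀ (string : String), Dom_Subpeptides string → Spec_Subpeptides string (Subpeptides string)

-- ===== LEMMAS AND PROOFS =====

-- a length-L window of string ++ string[:L-1] starting at j equals the length-L prefix of rotation j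
theorem pv_window_eq_rot_prefix (cs : List Char) (j L : Nat)
    (hj : j < cs.length) (hL : L ≤ cs.length) :
    ((cs ++ cs.take (L - 1)).drop j).take L = (cs.drop j ++ cs.take j).take L := by
  rw [List.drop_append_of_le_length (by omega)]
  rw [List.take_append, List.take_append, List.take_take, List.take_take]
  congr 2
  simp only [List.length_drop]
  omega

theorem Subpeptides_eq (string : String) : Subpeptides string = Subpeptides_alt string := by
  unfold Subpeptides Subpeptides_alt
  simp only [PySem.List.foldl_append_singleton_eq_map, PySem.List.foldl_append_eq_flatMap]
  set cs := string.toList with hcs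
  have hlen : PySem.Str.len string = (cs.length : Int) := by
    simp [PySem.Str.len, hcs]
  rw [hlen]
  congr 1
  rw [PySem.List.pyRange_one, List.flatMap_map, List.range'_eq_map_range, List.flatMap_map]
  rw [List.flatMap, List.flatMap]
  have hn : ((cs.length : Int) - 1).toNat = cs.length - 1 := by omega
  rw [hn]
  simp only [List.nil_append]
  congr 1
  apply congrArg List.flatten
  apply List.map_congr_left
  intro k hk
  rw [List.mem_range] at hk
  -- A side at L = 1 + k
  have h1 : (1 : Int) + (k : Int) - 1 = ((k : Nat) : Int) := by ring
  rw [h1, PySem.List.slice_zero_start, PySem.List.slice_to_natCast]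
  have hkn : k ≤ cs.length := by omega
  have hlen2 : ((cs ++ cs.take k).length : Int) - (1 + (k : Int)) + 1 = (cs.length : Int) := by
    simp [List.length_append, List.length_take, Nat.min_eq_left hkn]
  rw [hlen2, PySem.List.pyRange_zero_natCast, List.map_map, List.map_map]
  apply List.map_congr_left
  intro j hj
  rw [List.mem_range] at hj
  simp only [Function.comp]
  have h2 : (j : Int) + (1 + (k : Int)) = ((j : Nat) : Int) + (((1 + k : Nat)) : Int) := by
    push_cast; ring
  rw [h2, PySem.List.slice_natCast_add]
  congr 1
  have := pv_window_eq_rot_prefix cs j (1 + k) hj (by omega)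
  simpa using this

-- ===== VERDICT (by name: the statement is the Claim_ definition above) =====
theorem Subpeptides_spec : Claim_equal_Subpeptides := by
  intro string _
  unfold Spec_Subpeptides
  exact Subpeptides_eq string
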